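-- pv_equiv track=rewrite | github.com/adalfarus/Home-Romee-Server | frontend_server/src/analyze.py | calc_longest_streak_per_session
-- ===== SOURCE A (Python) =====
-- def calc_longest_streak_per_session(sessions, main_idx):
--     max_streaks = []
--     for session in sessions:
--         streak = max_streak = 0
--         for game in session:
--             if game[main_idx] == 0:
--                 streak += 1
--                 max_streak = max(max_streak, streak)
--             else:
--                 streak = 0
--         max_streaks.append(max_streak)
--     return max(max_streaks) if max_streaks else 0
-- ===== SOURCE B (Python) =====
-- def calc_longest_streak_per_session(sessions, main_idx):
--     # Run-length two-pointer scan: precompute zero-flags per session, then jump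
--     # over each maximal zero-run at once, keeping one global best.
--     best = 0
--     for session in sessions:
--         flags = [game[main_idx] == 0 for game in session]
--         n = len(flags)
--         i = 0
--         while i < n:
--             if flags[i]:
--                 j = i
--                 while j < n and flags[j]:
--                     j += 1
--                 best = max(best, j - i)
--                 i = j
--             else:
--                 i += 1
--     return best
-- ===== Notes on version B (the rewrite author's own statement) =====
-- stated objective: alternative
-- what changed: Replaces A's per-session running-counter state machine plus collected max_streaks list with a two-pointer run-length scan over precomputed zero-flags that jumps over each maximal zero-run and keeps a single global best.
import Mathlib
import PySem

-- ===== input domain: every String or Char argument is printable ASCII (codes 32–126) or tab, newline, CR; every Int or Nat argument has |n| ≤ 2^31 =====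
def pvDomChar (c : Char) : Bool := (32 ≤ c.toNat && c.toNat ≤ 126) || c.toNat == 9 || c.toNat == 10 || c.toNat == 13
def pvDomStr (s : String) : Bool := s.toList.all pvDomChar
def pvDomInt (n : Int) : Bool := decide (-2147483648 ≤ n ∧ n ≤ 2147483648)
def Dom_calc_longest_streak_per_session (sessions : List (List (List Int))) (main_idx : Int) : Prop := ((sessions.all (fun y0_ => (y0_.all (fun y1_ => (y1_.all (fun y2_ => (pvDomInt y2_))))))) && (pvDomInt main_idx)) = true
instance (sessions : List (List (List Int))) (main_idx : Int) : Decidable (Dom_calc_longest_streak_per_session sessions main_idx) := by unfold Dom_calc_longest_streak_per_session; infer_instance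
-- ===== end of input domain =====

-- B replaces A's running-counter state machine with a two-pointer run-length scan over
-- precomputed zero-flags keeping one global best (alternative decomposition, same cost).


-- ===== PORT A =====
def calc_longest_streak_per_session (sessions : List (List (List Int))) (main_idx : Int) : Int :=
  let max_streaks := sessions.foldl (fun ms session =>
    let p := session.foldl (fun (p : Int × Int) game =>
      if (PySem.List.pyGet? game main_idx).getD 1 == 0 then
        (p.1 + 1, max p.2 (p.1 + 1))
      else
        (0, p.2)) ((0 : Int), (0 : Int))
    ms ++ [p.2]) ([] : List Int)
  match PySem.List.max? max_streaks (fun x => x) with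
  | some m => m
  | none => 0

-- ===== PORT B =====
-- inner `while j < n and flags[j]: j += 1` loop (fuel = n bounds the iterations)
def pvRunEnd (flags : List Bool) (j : Nat) : Nat → Nat
  | 0 => j
  | fuel + 1 =>
    if j < flags.length ∧ flags.getD j false then pvRunEnd flags (j + 1) fuel else j

-- outer `while i < n` loop of B, carrying the global best (fuel = n)
def pvOuter (flags : List Bool) (i : Nat) (best : Int) : Nat → Int
  | 0 => best
  | fuel + 1 =>
    if i < flags.length then
      if flags.getD i false then
        let j := pvRunEnd flags i flags.length
        pvOuter flags j (max best ((j : Int) - (i : Int))) fuel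
      else pvOuter flags (i + 1) best fuel
    else best

def calc_longest_streak_per_session_alt (sessions : List (List (List Int))) (main_idx : Int) : Int :=
  sessions.foldl (fun best session =>
    let flags := session.map (fun game => (PySem.List.pyGet? game main_idx).getD 1 == 0)
    pvOuter flags 0 best flags.length) 0

-- ===== PRECONDITION & SPEC =====
-- Pre_ excludes exactly the inputs where Python raises IndexError: some game for which
-- main_idx is not a valid (possibly negative) index.
def Pre_calc_longest_streak_per_session (sessions : List (List (List Int))) (main_idx : Int) : Prop :=
  ∀ session ∈ sessions, ∀ game ∈ session, PySem.Raise.InRange game.length main_idx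

instance (sessions : List (List (List Int))) (main_idx : Int) : Decidable (Pre_calc_longest_streak_per_session sessions main_idx) := by unfold Pre_calc_longest_streak_per_session; infer_instance

def pvWitness_calc_longest_streak_per_session : List (List (List Int)) × Int :=
  ([[[0, 5], [0, 3], [1, 2]], [[0, 1]]], 0)

def Spec_calc_longest_streak_per_session (sessions : List (List (List Int))) (main_idx : Int) (out : Int) : Prop := out = calc_longest_streak_per_session_alt sessions main_idx
instance (sessions : List (List (List Int))) (main_idx : Int) (out : Int) : Decidable (Spec_calc_longest_streak_per_session sessions main_idx out) := by unfold Spec_calc_longest_streak_per_session; infer_instance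

-- ===== CLAIM (what is proved, stated in full; the proofs are below) =====
def Claim_equal_calc_longest_streak_per_session : Prop := ∀ (sessions : List (List (List Int))) (main_idx : Int), Dom_calc_longest_streak_per_session sessions main_idx → Pre_calc_longest_streak_per_session sessions main_idx → Spec_calc_longest_streak_per_session sessions main_idx (calc_longest_streak_per_session sessions main_idx)

-- ===== LEMMAS AND PROOFS =====

-- length of the leading run of `true`s
def pvLead : List Bool → Nat
  | [] => 0
  | b :: t => if b then pvLead t + 1 else 0

-- pvAux s zs = best streak reachable with current streak s (A's state machine, denotationally)
def pvAux : Int → List Bool → Int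
  | s, [] => s
  | s, b :: t => if b then pvAux (s + 1) t else max s (pvAux 0 t)

theorem pvAux_ge (zs : List Bool) : ∀ s : Int, s ≤ pvAux s zs := by
  induction zs with
  | nil => intro s; simp [pvAux]
  | cons b t ih =>
    intro s
    simp only [pvAux]
    split
    · exact le_trans (by omega) (ih (s + 1))
    · exact le_max_left _ _

theorem pvAux_nonneg (zs : List Bool) {s : Int} (hs : 0 ≤ s) : 0 ≤ pvAux s zs :=
  le_trans hs (pvAux_ge zs s)

def pvStepA : Int × Int → Bool → Int × Int :=
  fun p b => if b then (p.1 + 1, max p.2 (p.1 + 1)) else (0, p.2)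

theorem pvFoldA (zs : List Bool) : ∀ s m : Int, 0 ≤ s → s ≤ m →
    (zs.foldl pvStepA (s, m)).2 = max m (pvAux s zs) := by
  induction zs with
  | nil => intro s m h0 hm; simp [pvAux, max_eq_left hm]
  | cons b t ih =>
    intro s m h0 hm
    cases b with
    | true =>
      simp only [List.foldl, pvStepA, if_true, pvAux]
      rw [ih (s + 1) (max m (s + 1)) (by omega) (le_max_right _ _)]
      have h := pvAux_ge t (s + 1)
      rw [max_assoc]
      congr 1
      exact max_eq_right h
    | false =>
      simp only [List.foldl, pvStepA, Bool.false_eq_true, if_false, pvAux]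
      rw [ih 0 m le_rfl (le_trans h0 hm)]
      rw [← max_assoc, max_eq_left hm]

theorem pvRunEnd_eq (flags : List Bool) : ∀ (fuel j : Nat), flags.length ≤ j + fuel →
    pvRunEnd flags j fuel = j + pvLead (flags.drop j) := by
  intro fuel
  induction fuel with
  | zero =>
    intro j h
    have : flags.drop j = [] := List.drop_eq_nil_of_le (by omega)
    simp [pvRunEnd, this, pvLead]
  | succ fuel ih =>
    intro j h
    by_cases hj : j < flags.length
    · have hdrop : flags.drop j = flags[j] :: flags.drop (j + 1) := List.drop_eq_getElem_cons hj
      have hget : flags.getD j false = flags[j] := List.getD_eq_getElem flags false hj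
      cases hfj : flags[j] with
      | true =>
        simp only [pvRunEnd, hget, hfj, hj, and_true, if_pos]
        rw [ih (j + 1) (by omega), hdrop, hfj]
        simp [pvLead]; omega
      | false =>
        simp only [pvRunEnd, hget, hfj]
        rw [hdrop, hfj]
        simp [pvLead]
    · have : flags.drop j = [] := List.drop_eq_nil_of_le (by omega)
      simp [pvRunEnd, hj, this, pvLead]

theorem pvLead_pos {flags : List Bool} {j : Nat} (hj : j < flags.length)
    (ht : flags[j] = true) : 1 ≤ pvLead (flags.drop j) := by
  rw [List.drop_eq_getElem_cons hj, ht]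
  simp [pvLead]

theorem pvAux_split (t : List Bool) : ∀ s : Int, 0 ≤ s →
    pvAux s t = max (s + (pvLead t : Int)) (pvAux 0 (t.drop (pvLead t))) := by
  induction t with
  | nil => intro s hs; simp [pvAux, pvLead, max_eq_left hs]
  | cons b r ih =>
    intro s hs
    cases b with
    | true =>
      simp only [pvAux, pvLead, if_true]
      rw [ih (s + 1) (by omega)]
      have : ((pvLead r : Int) + 1) = ((pvLead r + 1 : Nat) : Int) := by push_cast; ring
      rw [show s + 1 + (pvLead r : Int) = s + ((pvLead r + 1 : Nat) : Int) by push_cast; ring]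
      congr 1
    | false =>
      simp only [pvAux, pvLead, Bool.false_eq_true, if_false]
      have h0 : (0:Int) ≤ pvAux 0 r := pvAux_nonneg r le_rfl
      simp only [Nat.cast_zero, add_zero, List.drop_zero, pvAux, Bool.false_eq_true, if_false]
      rw [max_eq_right h0]

theorem pvOuter_eq (flags : List Bool) : ∀ (fuel i : Nat) (best : Int), 0 ≤ best →
    flags.length ≤ i + fuel →
    pvOuter flags i best fuel = max best (pvAux 0 (flags.drop i)) := by
  intro fuel
  induction fuel with
  | zero =>
    intro i best hb h
    have : flags.drop i = [] := List.drop_eq_nil_of_le (by omega)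
    simp [pvOuter, this, pvAux, max_eq_left hb]
  | succ fuel ih =>
    intro i best hb h
    by_cases hi : i < flags.length
    · have hget : flags.getD i false = flags[i] := List.getD_eq_getElem flags false hi
      cases hfi : flags[i] with
      | true =>
        have hrun : pvRunEnd flags i flags.length = i + pvLead (flags.drop i) :=
          pvRunEnd_eq flags flags.length i (by omega)
        have hpos : 1 ≤ pvLead (flags.drop i) := pvLead_pos hi hfi
        simp only [pvOuter, hi, if_pos, hget, hfi]
        rw [hrun]
        have hcast : ((i + pvLead (flags.drop i) : Nat) : Int) - (i : Int) = (pvLead (flags.drop i) : Int) := by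
          push_cast; ring
        rw [hcast]
        rw [ih (i + pvLead (flags.drop i)) (max best (pvLead (flags.drop i) : Int))
          (le_trans hb (le_max_left _ _)) (by omega)]
        rw [pvAux_split (flags.drop i) 0 le_rfl]
        rw [List.drop_drop]
        simp only [zero_add]
        rw [max_assoc]
      | false =>
        simp only [pvOuter, hi, if_pos, hget, hfi, Bool.false_eq_true, if_false]
        rw [ih (i + 1) best hb (by omega)]
        have hdrop : flags.drop i = flags[i] :: flags.drop (i + 1) := List.drop_eq_getElem_cons hi
        rw [hdrop, hfi]
        simp only [pvAux, Bool.false_eq_true, if_false]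
        rw [max_eq_right (pvAux_nonneg _ le_rfl)]
    · have : flags.drop i = [] := List.drop_eq_nil_of_le (by omega)
      simp [pvOuter, hi, this, pvAux, max_eq_left hb]

-- per-session value shared by both sides
def pvVal (main_idx : Int) (session : List (List Int)) : Int :=
  pvAux 0 (session.map (fun game => (PySem.List.pyGet? game main_idx).getD 1 == 0))

theorem pvA_inner (main_idx : Int) (session : List (List Int)) :
    (session.foldl (fun (p : Int × Int) game =>
      if (PySem.List.pyGet? game main_idx).getD 1 == 0 then
        (p.1 + 1, max p.2 (p.1 + 1))
      else
        (0, p.2)) ((0 : Int), (0 : Int))).2 = pvVal main_idx session := by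
  have hmap := List.foldl_map (f := fun game => (PySem.List.pyGet? game main_idx).getD 1 == 0)
    (g := pvStepA) (l := session) (init := ((0:Int), (0:Int)))
  have hfold := pvFoldA (session.map (fun game => (PySem.List.pyGet? game main_idx).getD 1 == 0))
    0 0 le_rfl le_rfl
  rw [hmap] at hfold
  simp only [pvStepA] at hfold
  rw [pvVal]
  rw [hfold]
  exact max_eq_right (pvAux_nonneg _ le_rfl)

theorem pvB_session (main_idx : Int) (session : List (List Int)) (best : Int) (hb : 0 ≤ best) :
    (let flags := session.map (fun game => (PySem.List.pyGet? game main_idx).getD 1 == 0)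
     pvOuter flags 0 best flags.length) = max best (pvVal main_idx session) := by
  simp only []
  rw [pvOuter_eq _ _ 0 best hb (by omega)]
  rfl

theorem pvA_ms (main_idx : Int) : ∀ (sessions : List (List (List Int))) (acc : List Int),
    sessions.foldl (fun ms session =>
      let p := session.foldl (fun (p : Int × Int) game =>
        if (PySem.List.pyGet? game main_idx).getD 1 == 0 then
          (p.1 + 1, max p.2 (p.1 + 1))
        else
          (0, p.2)) ((0 : Int), (0 : Int))
      ms ++ [p.2]) acc = acc ++ sessions.map (pvVal main_idx) := by
  intro sessions
  induction sessions with
  | nil => intro acc; simp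
  | cons s rest ih =>
    intro acc
    simp only [List.foldl, List.map]
    rw [ih, pvA_inner]
    simp

theorem pvB_fold (main_idx : Int) : ∀ (sessions : List (List (List Int))) (best : Int), 0 ≤ best →
    sessions.foldl (fun best session =>
      let flags := session.map (fun game => (PySem.List.pyGet? game main_idx).getD 1 == 0)
      pvOuter flags 0 best flags.length) best
    = (sessions.map (pvVal main_idx)).foldl max best := by
  intro sessions
  induction sessions with
  | nil => intro best hb; simp
  | cons s rest ih =>
    intro best hb
    simp only [List.foldl, List.map]
    rw [pvB_session main_idx s best hb, ih _ (le_trans hb (le_max_left _ _))]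

theorem pvMax_vals (vs : List Int) (hv : ∀ x ∈ vs, 0 ≤ x) :
    (match PySem.List.max? vs (fun x => x) with
     | some m => m
     | none => (0 : Int)) = vs.foldl max 0 := by
  cases vs with
  | nil => simp [PySem.List.max?]
  | cons x t =>
    rw [PySem.List.max?_id_cons]
    simp only [List.foldl]
    have hx : 0 ≤ x := hv x (by simp)
    rw [show max (0 : Int) x = x from max_eq_right hx]

-- ===== VERDICT (by name: the statement is the Claim_ definition above) =====
theorem calc_longest_streak_per_session_spec : Claim_equal_calc_longest_streak_per_session := by
  intro sessions main_idx _hdom _hpre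
  unfold Spec_calc_longest_streak_per_session
  unfold calc_longest_streak_per_session calc_longest_streak_per_session_alt
  simp only []
  rw [pvA_ms, pvB_fold main_idx sessions 0 le_rfl]
  rw [List.nil_append]
  rw [pvMax_vals]
  intro x hx
  rcases List.mem_map.mp hx with ⟨s, _, rfl⟩
  exact pvAux_nonneg _ le_rfl
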